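-- pv_equiv track=rewrite | github.com/namelesswq/science_plot_script | perturbo_plot/plot_sigma_kappa_vs_temperature.py | _broadcast_str_pairs
-- ===== SOURCE A (Python) =====
-- from typing import Dict, List, Optional, Sequence, Tuple
--
-- def _broadcast_str_pairs(xs: Sequence[str], n_files: int, name: str) -> List[str]:
--     n_lines = 2 * n_files
--     if len(xs) == n_lines:
--         return [str(x) for x in xs]
--     if len(xs) == 1:
--         return [str(xs[0])] * n_lines
--     if len(xs) == 2:
--         return [str(xs[0]), str(xs[1])] * n_files
--     raise SystemExit(f"{name} expects 1, 2, or {n_lines} values, but got {len(xs)}")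
-- ===== SOURCE B (Python) =====
-- def _broadcast_str_pairs(xs, n_files, name):
--     n_lines = 2 * n_files
--     if len(xs) != n_lines and len(xs) not in (1, 2):
--         raise SystemExit(f"{name} expects 1, 2, or {n_lines} values, but got {len(xs)}")
--     out = [str(x) for x in xs]
--     while len(out) < n_lines:
--         out = out + out
--     return out[:n_lines]
-- ===== Notes on version B (the rewrite author's own statement) =====
-- stated objective: alternative
-- what changed: Replaces A's three hand-coded shape branches (copy / replicate single / repeat pair) by a validate-then-tile scheme: convert once, grow the list by repeated self-doubling until it reaches 2*n_files elements, then slice to exact length; O(log) concatenations instead of per-shape construction.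
import Mathlib
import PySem

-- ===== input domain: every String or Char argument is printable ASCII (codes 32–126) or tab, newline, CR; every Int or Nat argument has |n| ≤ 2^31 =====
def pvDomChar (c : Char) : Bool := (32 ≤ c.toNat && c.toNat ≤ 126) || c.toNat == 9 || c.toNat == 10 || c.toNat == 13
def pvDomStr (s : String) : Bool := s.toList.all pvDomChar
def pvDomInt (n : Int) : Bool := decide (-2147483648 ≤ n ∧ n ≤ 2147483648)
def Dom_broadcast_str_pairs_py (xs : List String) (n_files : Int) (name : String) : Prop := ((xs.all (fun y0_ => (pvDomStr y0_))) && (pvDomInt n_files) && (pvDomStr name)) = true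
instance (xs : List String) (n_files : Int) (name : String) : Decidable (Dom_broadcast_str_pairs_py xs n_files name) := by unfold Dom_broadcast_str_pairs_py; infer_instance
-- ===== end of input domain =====

-- B replaces A's three shape branches by validate, then tile by repeated
-- self-doubling of the list and a final slice to 2*n_files elements
-- (objective: alternative). A raises SystemExit when
-- len(xs) ∉ {1, 2, 2*n_files}; those inputs are outside Pre_.

-- ===== PORT A =====
def broadcast_str_pairs_py (xs : List String) (n_files : Int) (_name : String) : List String :=
  let n_lines : Int := 2 * n_files
  if (xs.length : Int) = n_lines then
    xs.map (fun x => x)                         -- str(x) on a str is x itself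
  else if xs.length = 1 then
    List.replicate n_lines.toNat (PySem.List.pyGetD xs 0 "")   -- [str(xs[0])] * n_lines (empty for n_lines ≤ 0)
  else if xs.length = 2 then
    (List.replicate n_files.toNat [PySem.List.pyGetD xs 0 "", PySem.List.pyGetD xs 1 ""]).flatten
  else
    []                                          -- Python: raise SystemExit(...) — excluded by Pre_

-- ===== PORT B =====
-- the 'while len(out) < n_lines: out = out + out' loop of Source B; the
-- 'out ≠ []' conjunct only makes the recursion total (in Python the loop is
-- reached with out = [] only when n_lines ≤ 0, where it exits at once too)
def pvGrow (out : List String) (n : Int) : List String :=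
  if h : out ≠ [] ∧ (out.length : Int) < n then pvGrow (out ++ out) n else out
termination_by (n - out.length).toNat
decreasing_by
  have : 0 < out.length := List.length_pos_iff.mpr h.1
  simp only [List.length_append]
  omega

def broadcast_str_pairs_py_alt (xs : List String) (n_files : Int) (_name : String) : List String :=
  let n_lines : Int := 2 * n_files
  if (xs.length : Int) ≠ n_lines ∧ ¬ (xs.length = 1 ∨ xs.length = 2) then
    []                                          -- Python: raise SystemExit(...) — excluded by Pre_
  else
    PySem.List.slice (pvGrow (xs.map (fun x => x)) n_lines) none (some n_lines)   -- out[:n_lines]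

-- ===== PRECONDITION & SPEC =====
-- Pre_ excludes exactly the inputs on which A raises SystemExit (len(xs) ∉ {1, 2, 2*n_files}).
def Pre_broadcast_str_pairs_py (xs : List String) (n_files : Int) (name : String) : Prop :=
  xs.length = 1 ∨ xs.length = 2 ∨ (xs.length : Int) = 2 * n_files
instance (xs : List String) (n_files : Int) (name : String) : Decidable (Pre_broadcast_str_pairs_py xs n_files name) := by unfold Pre_broadcast_str_pairs_py; infer_instance
def pvWitness_broadcast_str_pairs_py : List String × Int × String := (["a", "b"], 3, "color")
def Spec_broadcast_str_pairs_py (xs : List String) (n_files : Int) (name : String) (out : List String) : Prop := out = broadcast_str_pairs_py_alt xs n_files name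
instance (xs : List String) (n_files : Int) (name : String) (out : List String) : Decidable (Spec_broadcast_str_pairs_py xs n_files name out) := by unfold Spec_broadcast_str_pairs_py; infer_instance

-- ===== CLAIM (what is proved, stated in full; the proofs are below) =====
def Claim_equal_broadcast_str_pairs_py : Prop := ∀ (xs : List String) (n_files : Int) (name : String), Dom_broadcast_str_pairs_py xs n_files name → Pre_broadcast_str_pairs_py xs n_files name → Spec_broadcast_str_pairs_py xs n_files name (broadcast_str_pairs_py xs n_files name)

-- ===== LEMMAS AND PROOFS =====

lemma len_flatten_replicate {α : Type} (j : Nat) (L : List α) :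
    ((List.replicate j L).flatten).length = j * L.length := by
  induction j with
  | zero => simp
  | succ k ih => simp [List.replicate_succ, ih, Nat.succ_mul]; ring

lemma flatten_replicate_singleton {α : Type} (J : Nat) (a : α) :
    (List.replicate J [a]).flatten = List.replicate J a := by
  induction J with
  | zero => simp
  | succ k ih => simp [List.replicate_succ, ih]

lemma take_two_mul_flatten_pair {α : Type} (a b : α) :
    ∀ (m J : Nat), m ≤ J →
      List.take (2 * m) ((List.replicate J [a, b]).flatten)
        = (List.replicate m [a, b]).flatten := by
  intro m
  induction m with
  | zero => intro J _; simp
  | succ k ih =>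
    intro J hJ
    obtain ⟨J', rfl⟩ : ∃ J', J = J' + 1 := ⟨J - 1, by omega⟩
    have h2 : 2 * (k + 1) = (2 * k) + 1 + 1 := by ring
    simp only [List.replicate_succ, List.flatten_cons, h2]
    simp [List.take_succ_cons, ih J' (by omega)]

-- the doubling loop maps base^j to base^J with n ≤ J * |base|
lemma pvGrow_spec (base : List String) (hb : base ≠ []) (n : Int) :
    ∀ (k j : Nat), 0 < j → (n - ((j * base.length : Nat) : Int)).toNat ≤ k →
      ∃ J : Nat, j ≤ J ∧
        pvGrow ((List.replicate j base).flatten) n = (List.replicate J base).flatten ∧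
        n ≤ ((J * base.length : Nat) : Int) := by
  intro k
  induction k with
  | zero =>
    intro j hj hk
    have hbl : 0 < base.length := List.length_pos_iff.mpr hb
    have hlen : ((List.replicate j base).flatten).length = j * base.length :=
      len_flatten_replicate j base
    have hle : n ≤ ((j * base.length : Nat) : Int) := by omega
    refine ⟨j, le_refl j, ?_, hle⟩
    rw [pvGrow]
    rw [dif_neg]
    rw [hlen]
    intro h
    exact absurd h.2 (by omega)
  | succ k ih =>
    intro j hj hk
    have hbl : 0 < base.length := List.length_pos_iff.mpr hb
    have hlen : ((List.replicate j base).flatten).length = j * base.length :=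
      len_flatten_replicate j base
    by_cases hle : n ≤ ((j * base.length : Nat) : Int)
    · refine ⟨j, le_refl j, ?_, hle⟩
      rw [pvGrow]
      rw [dif_neg]
      rw [hlen]
      intro h
      exact absurd h.2 (by omega)
    · have hne : (List.replicate j base).flatten ≠ [] :=
        List.length_pos_iff.mp (by rw [hlen]; exact Nat.mul_pos hj hbl)
      have hcond : (List.replicate j base).flatten ≠ [] ∧
          (((List.replicate j base).flatten).length : Int) < n := by
        refine ⟨hne, ?_⟩; rw [hlen]; omega
      have hdouble : (List.replicate j base).flatten ++ (List.replicate j base).flatten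
          = (List.replicate (j + j) base).flatten := by
        rw [← List.flatten_append, ← List.replicate_add]
      have hpr : (j + j) * base.length = j * base.length + j * base.length := by ring
      have hp1 : 0 < j * base.length := Nat.mul_pos hj hbl
      obtain ⟨J, hJle, hJeq, hJn⟩ := ih (j + j) (by omega) (by
        rw [hpr]
        omega)
      refine ⟨J, by omega, ?_, hJn⟩
      rw [pvGrow, dif_pos hcond, hdouble, hJeq]

-- ===== VERDICT (by name: the statement is the Claim_ definition above) =====
theorem broadcast_str_pairs_py_spec : Claim_equal_broadcast_str_pairs_py := by
  intro xs n_files name _ hpre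
  unfold Spec_broadcast_str_pairs_py broadcast_str_pairs_py broadcast_str_pairs_py_alt
  simp only []
  have hvalid : ¬ ((xs.length : Int) ≠ 2 * n_files ∧ ¬ (xs.length = 1 ∨ xs.length = 2)) := by
    unfold Pre_broadcast_str_pairs_py at hpre; tauto
  rw [if_neg hvalid, List.map_id']
  by_cases hfull : (xs.length : Int) = 2 * n_files
  · -- len(xs) == n_lines: the loop exits immediately and the slice copies
    rw [if_pos hfull]
    have hexit : pvGrow xs (2 * n_files) = xs := by
      rw [pvGrow, dif_neg]
      intro h
      exact absurd h.2 (by omega)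
    rw [hexit, ← hfull, PySem.List.slice_to _ (by positivity)]
    simp
  · rw [if_neg hfull]
    rcases hpre with h1 | h2 | h3
    · -- len(xs) == 1
      obtain ⟨a, rfl⟩ := List.length_eq_one_iff.mp h1
      rw [if_pos h1]
      by_cases hn : 0 < n_files
      · obtain ⟨J, hJle, hJeq, hJn⟩ :=
          pvGrow_spec [a] (by simp) (2 * n_files) ((2 * n_files - 1).toNat) 1 (by omega)
            (by simp)
        simp only [List.flatten_cons, List.flatten_nil, List.append_nil,
          List.replicate_one] at hJeq
        rw [hJeq, flatten_replicate_singleton,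
          PySem.List.slice_to _ (by omega), List.take_replicate]
        simp at hJn
        have : min (2 * n_files).toNat J = (2 * n_files).toNat := by omega
        rw [this]
        simp [PySem.List.pyGetD]
      · -- n_lines ≤ 0: both sides are []
        have hexit : pvGrow [a] (2 * n_files) = [a] := by
          rw [pvGrow, dif_neg]
          intro h
          simp at h
          omega
        rw [hexit]
        have hA : (2 * n_files).toNat = 0 := by omega
        rw [hA]
        rcases lt_or_eq_of_le (by omega : 2 * n_files ≤ 0) with hlt | heq
        · obtain ⟨c, hc, hck⟩ : ∃ c : Nat, 2 * n_files = -(c : Int) ∧ 0 < c :=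
            ⟨(-(2 * n_files)).toNat, by omega, by omega⟩
          rw [hc, PySem.List.slice_to_neg_natCast _ _ hck]
          simp
          omega
        · rw [heq, PySem.List.slice_to _ (by omega)]
          simp
    · -- len(xs) == 2
      obtain ⟨a, b, rfl⟩ := List.length_eq_two.mp h2
      rw [if_pos h2]
      by_cases hn : 0 < n_files
      · obtain ⟨J, hJle, hJeq, hJn⟩ :=
          pvGrow_spec [a, b] (by simp) (2 * n_files) ((2 * n_files - 2).toNat) 1 (by omega)
            (by simp)
        simp only [List.flatten_cons, List.flatten_nil, List.append_nil,
          List.replicate_one] at hJeq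
        rw [hJeq, PySem.List.slice_to _ (by omega)]
        simp only [List.length_cons, List.length_nil] at hJn
        have htn : (2 * n_files).toNat = 2 * n_files.toNat := by omega
        rw [htn, take_two_mul_flatten_pair a b n_files.toNat J (by omega)]
        simp [PySem.List.pyGetD]
      · -- n_lines ≤ 0: both sides are []
        have hexit : pvGrow [a, b] (2 * n_files) = [a, b] := by
          rw [pvGrow, dif_neg]
          intro h
          simp at h
          omega
        rw [hexit]
        have hA : n_files.toNat = 0 := by omega
        rw [hA]
        rcases lt_or_eq_of_le (by omega : 2 * n_files ≤ 0) with hlt | heq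
        · obtain ⟨c, hc, hck⟩ : ∃ c : Nat, 2 * n_files = -(c : Int) ∧ 0 < c :=
            ⟨(-(2 * n_files)).toNat, by omega, by omega⟩
          rw [hc, PySem.List.slice_to_neg_natCast _ _ hck]
          simp
          omega
        · rw [heq, PySem.List.slice_to _ (by omega)]
          simp
    · exact absurd h3 hfull
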